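-- pv_equiv track=rewrite | github.com/molinajimenez/LenguajesPR2 | utils.py | get_alphabet_set
-- ===== SOURCE A (Python) =====
-- def get_alphabet_set(initial, final):
--     if initial.islower():
--         alpha = "abcdefghijklmnopqrstuvwxyz"
--     else:
--         alpha = "ABCDEFGHIJKLMNOPQRSTUVWXYZ"
--
--     alpha = list(alpha)
--     toReturn = ""
--     counter = 0
--     for i in range(len(alpha)):
--         if initial == alpha[i]:
--             x = alpha[i]
--             counter = i
--
--             for j in range(counter, len(alpha)):
--                 if x != final:
--                     x = alpha[j]
--                     toReturn += alpha[j]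
--                 else:
--                     break
--
--             break
--
--     return toReturn
-- ===== SOURCE B (Python) =====
-- def get_alphabet_set(initial, final):
--     # Closed-form: the alphabet is a contiguous code-point run, so compute the
--     # answer with ord/chr arithmetic instead of scanning character lists.
--     if initial.islower():
--         a, z = 'a', 'z'
--     else:
--         a, z = 'A', 'Z'
--     if len(initial) != 1 or not (a <= initial <= z):
--         return ""
--     if initial == final:
--         return ""
--     if len(final) == 1 and initial < final <= z:
--         end = ord(final)
--     else:
--         end = ord(z)
--     return "".join(chr(c) for c in range(ord(initial), end + 1))
-- ===== Notes on version B (the rewrite author's own statement) =====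
-- stated objective: simpler
-- what changed: Replaces A's nested character-by-character scan of a list(alphabet) with an accumulated string by direct ord/chr arithmetic on the contiguous code-point run: validate the initial letter by code-point bounds, compute the end code point from final, and build the result with one range().
import Mathlib
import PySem

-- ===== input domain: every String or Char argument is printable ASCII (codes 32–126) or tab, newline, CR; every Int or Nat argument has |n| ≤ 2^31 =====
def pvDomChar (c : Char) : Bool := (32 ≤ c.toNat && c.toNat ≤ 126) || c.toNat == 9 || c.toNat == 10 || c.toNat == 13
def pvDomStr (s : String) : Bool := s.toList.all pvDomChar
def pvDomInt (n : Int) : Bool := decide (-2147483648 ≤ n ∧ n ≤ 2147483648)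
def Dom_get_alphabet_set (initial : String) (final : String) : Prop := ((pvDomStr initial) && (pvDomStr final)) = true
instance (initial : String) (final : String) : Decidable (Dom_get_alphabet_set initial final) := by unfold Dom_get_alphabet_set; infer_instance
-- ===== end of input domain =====

-- B replaces A's nested char-by-char scan of a list of the alphabet by ord/chr
-- arithmetic on the contiguous code-point run (objective: simpler closed form).

-- ===== PORT A =====
-- Python str.islower(): at least one cased char and no non-lowercase cased char;
-- exact on the ASCII domain, where the cased chars are exactly the letters.
def pyStrIslower (cs : List Char) : Bool :=
  cs.any PySem.Chars.islower && !(cs.any PySem.Chars.isupper)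

-- A's inner `for j` loop: walks the rest of alpha carrying x and toReturn, `break` = return acc
def innerA (final : String) : List Char → String → String → String
  | [], _, acc => acc
  | c :: cs, x, acc =>
    if x ≠ final then innerA final cs (String.ofList [c]) (acc ++ String.ofList [c]) else acc

-- A's outer `for i` loop: scan alpha for the char equal to initial, run the inner loop from it
def outerA (initial final : String) : List Char → String
  | [] => ""
  | c :: cs =>
    if initial = String.ofList [c] then innerA final (c :: cs) (String.ofList [c]) ""
    else outerA initial final cs

def get_alphabet_set (initial : String) (final : String) : String :=
  let alpha := (if pyStrIslower initial.toList then "abcdefghijklmnopqrstuvwxyz"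
                else "ABCDEFGHIJKLMNOPQRSTUVWXYZ").toList
  outerA initial final alpha

-- ===== PORT B =====
-- Python's `<=`/`<` on single-char strings is code-point comparison, ported via .toNat;
-- `"".join(chr(c) for c in range(a, b))` is String.ofList ((List.range' a (b - a)).map Char.ofNat).
def get_alphabet_set_alt (initial : String) (final : String) : String :=
  let lower := pyStrIslower initial.toList
  let a : Char := if lower then 'a' else 'A'
  let z : Char := if lower then 'z' else 'Z'
  match initial.toList with
  | [c] =>
    if a.toNat ≤ c.toNat ∧ c.toNat ≤ z.toNat then
      if initial = final then ""
      else
        let e : Nat :=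
          match final.toList with
          | [f] => if c.toNat < f.toNat ∧ f.toNat ≤ z.toNat then f.toNat else z.toNat
          | _ => z.toNat
        String.ofList ((List.range' c.toNat (e + 1 - c.toNat)).map Char.ofNat)
    else ""
  | _ => ""

-- ===== PRECONDITION & SPEC =====
def Spec_get_alphabet_set (initial : String) (final : String) (out : String) : Prop := out = get_alphabet_set_alt initial final
instance (initial : String) (final : String) (out : String) : Decidable (Spec_get_alphabet_set initial final out) := by unfold Spec_get_alphabet_set; infer_instance

-- ===== CLAIM (what is proved, stated in full; the proofs are below) =====
def Claim_equal_get_alphabet_set : Prop := ∀ (initial : String) (final : String), Dom_get_alphabet_set initial final → Spec_get_alphabet_set initial final (get_alphabet_set initial final)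

-- ===== LEMMAS AND PROOFS =====

theorem toNat_ofNat_of_lt {n : Nat} (h : n < 128) : (Char.ofNat n).toNat = n := by
  rw [Char.toNat_ofNat, if_pos]; exact Or.inl (by omega)

theorem char_toNat_inj {c d : Char} (h : c.toNat = d.toNat) : c = d := by
  have := congrArg Char.ofNat h
  rwa [Char.ofNat_toNat, Char.ofNat_toNat] at this

theorem str_ext {s t : String} (h : s.toList = t.toList) : s = t := by
  have := congrArg String.ofList h
  simpa using this

theorem ofList_single_inj {a b : Char} (h : String.ofList [a] = String.ofList [b]) : a = b := by
  have := congrArg String.toList h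
  simpa using this

-- what A's inner loop computes: the scanned chars through the first copy of final
def takeThru (final : String) : List Char → List Char
  | [] => []
  | c :: cs => c :: (if String.ofList [c] = final then [] else takeThru final cs)

theorem inner_stop (final : String) (l : List Char) (acc : String) :
    innerA final l final acc = acc := by
  cases l <;> simp [innerA]

theorem inner_eq (final : String) (l : List Char) : ∀ (x acc : String), x ≠ final →
    innerA final l x acc = acc ++ String.ofList (takeThru final l) := by
  induction l with
  | nil =>
    intro x acc h
    simp [innerA, takeThru]
  | cons c cs ih =>
    intro x acc h
    rw [innerA, if_pos h, takeThru]
    by_cases hc : String.ofList [c] = final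
    · rw [if_pos hc, hc, inner_stop]
    · rw [if_neg hc, ih _ _ hc]
      apply str_ext
      simp

theorem outer_nomatch (initial final : String) (l : List Char)
    (h : ∀ d ∈ l, initial ≠ String.ofList [d]) : outerA initial final l = "" := by
  induction l with
  | nil => rfl
  | cons c cs ih =>
    rw [outerA, if_neg (h c (by simp))]
    exact ih fun d hd => h d (by simp [hd])

theorem outer_run (final : String) (k : Nat) : ∀ (n s : Nat), s + n ≤ 128 → s ≤ k → k < s + n →
    outerA (String.ofList [Char.ofNat k]) final ((List.range' s n).map Char.ofNat)
      = innerA final ((List.range' k (s + n - k)).map Char.ofNat) (String.ofList [Char.ofNat k]) "" := by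
  intro n
  induction n with
  | zero => intro s _ _ h3; omega
  | succ n ih =>
    intro s h1 h2 h3
    rw [List.range'_succ, List.map_cons, outerA]
    by_cases hks : k = s
    · subst hks
      rw [if_pos rfl]
      have : k + (n + 1) - k = n + 1 := by omega
      rw [this, List.range'_succ, List.map_cons]
    · have hne : String.ofList [Char.ofNat k] ≠ String.ofList [Char.ofNat s] := by
        intro h
        have := ofList_single_inj h
        have := congrArg Char.toNat this
        rw [toNat_ofNat_of_lt (by omega), toNat_ofNat_of_lt (by omega)] at this
        exact hks this
      rw [if_neg hne]
      have := ih (s + 1) (by omega) (by omega) (by omega)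
      rw [this]
      have : s + 1 + n = s + (n + 1) := by omega
      rw [this]

-- the length A's scan reaches starting at s over a run of length n
def cutLenAux : List Char → Nat → Nat → Nat
  | [f], s, n => if s ≤ f.toNat ∧ f.toNat < s + n then f.toNat + 1 - s else n
  | _, _, n => n

def cutLen (final : String) (s n : Nat) : Nat := cutLenAux final.toList s n

theorem takeThru_run (final : String) : ∀ (n s : Nat), s + n ≤ 128 →
    takeThru final ((List.range' s n).map Char.ofNat)
      = (List.range' s (cutLen final s n)).map Char.ofNat := by
  intro n
  induction n with
  | zero =>
    intro s _
    have h0 : cutLen final s 0 = 0 := by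
      unfold cutLen
      rcases final.toList with _ | ⟨f, _ | ⟨g, gs⟩⟩ <;> simp [cutLenAux]
    rw [h0]
    rfl
  | succ n ih =>
    intro s h1
    rw [List.range'_succ, List.map_cons, takeThru]
    by_cases hc : String.ofList [Char.ofNat s] = final
    · have hf : final.toList = [Char.ofNat s] := by rw [← hc]; simp
      have hcut : cutLen final s (n + 1) = 1 := by
        have hts : (Char.ofNat s).toNat = s := toNat_ofNat_of_lt (by omega)
        unfold cutLen
        rw [hf]
        simp only [cutLenAux, hts]
        rw [if_pos (by omega)]
        omega
      rw [if_pos hc, hcut]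
      simp [List.range']
    · have hcut : cutLen final s (n + 1) = cutLen final (s + 1) n + 1 := by
        unfold cutLen
        rcases hf : final.toList with _ | ⟨f, _ | ⟨g, gs⟩⟩
        · simp [cutLenAux]
        · simp only [cutLenAux]
          have hfs : f.toNat ≠ s := by
            intro h
            apply hc
            apply str_ext
            rw [hf]
            have : Char.ofNat s = f := by rw [← h, Char.ofNat_toNat]
            simp [this]
          split_ifs <;> omega
        · simp [cutLenAux]
      rw [if_neg hc, ih (s + 1) (by omega), hcut, List.range'_succ, List.map_cons]

-- helpers describing what both ports compute (used only by the proofs)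
def finalEndAux : List Char → Char → Char → Nat
  | [f], c, z => if c.toNat < f.toNat ∧ f.toNat ≤ z.toNat then f.toNat else z.toNat
  | _, _, z => z.toNat

def finalEnd (final : String) (c z : Char) : Nat := finalEndAux final.toList c z

def gbodyAux : List Char → String → String → Char → Char → String
  | [c], initial, final, a, z =>
    if a.toNat ≤ c.toNat ∧ c.toNat ≤ z.toNat then
      if initial = final then ""
      else String.ofList ((List.range' c.toNat (finalEnd final c z + 1 - c.toNat)).map Char.ofNat)
    else ""
  | _, _, _, _, _ => ""

def gbody (initial final : String) (a z : Char) : String :=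
  gbodyAux initial.toList initial final a z

theorem alt_eq (initial final : String) :
    get_alphabet_set_alt initial final
      = gbody initial final (if pyStrIslower initial.toList then 'a' else 'A')
          (if pyStrIslower initial.toList then 'z' else 'Z') := by
  unfold get_alphabet_set_alt gbody gbodyAux finalEnd finalEndAux
  rcases hi : initial.toList with _ | ⟨c, _ | ⟨c2, cs⟩⟩ <;>
    rcases hf : final.toList with _ | ⟨f, _ | ⟨g, gs⟩⟩ <;>
      simp only [hf]

theorem A_eq_gbody (initial final : String) (a z : Char)
    (hz : z.toNat = a.toNat + 25) (hb : a.toNat + 26 ≤ 128) :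
    outerA initial final ((List.range' a.toNat 26).map Char.ofNat) = gbody initial final a z := by
  rcases hi : initial.toList with _ | ⟨c, _ | ⟨c2, cs⟩⟩
  · rw [gbody, hi]
    simp only [gbodyAux]
    apply outer_nomatch
    intro d _ heq
    have := congrArg String.toList heq
    simp [hi] at this
  · have hini : initial = String.ofList [c] := str_ext (by simp [hi])
    by_cases hcr : a.toNat ≤ c.toNat ∧ c.toNat ≤ z.toNat
    · have hco : Char.ofNat c.toNat = c := Char.ofNat_toNat c
      have h1 := outer_run final c.toNat 26 a.toNat (by omega) hcr.1 (by omega)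
      rw [hco, ← hini] at h1
      rw [h1, gbody, hi]
      simp only [gbodyAux]
      rw [if_pos hcr]
      by_cases hif : initial = final
      · rw [if_pos hif, hif, inner_stop]
      · rw [if_neg hif, inner_eq final _ _ _ hif]
        apply str_ext
        have hrun := takeThru_run final (a.toNat + 26 - c.toNat) c.toNat (by omega)
        have hcl : cutLen final c.toNat (a.toNat + 26 - c.toNat) = finalEnd final c z + 1 - c.toNat := by
          unfold cutLen finalEnd
          rcases hf : final.toList with _ | ⟨f, _ | ⟨g, gs⟩⟩
          · simp [cutLenAux, finalEndAux]; omega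
          · simp only [cutLenAux, finalEndAux]
            have hfc : f.toNat ≠ c.toNat := by
              intro h
              apply hif
              have hfin : final = String.ofList [f] := str_ext (by simp [hf])
              rw [hini, hfin, char_toNat_inj h]
            split_ifs <;> omega
          · simp [cutLenAux, finalEndAux]; omega
        simp [hrun, hcl]
    · rw [gbody, hi]
      simp only [gbodyAux]
      rw [if_neg hcr]
      apply outer_nomatch
      intro d hd heq
      simp only [List.mem_map] at hd
      obtain ⟨m, hm, rfl⟩ := hd
      rw [List.mem_range'_1] at hm
      have hcm : c = Char.ofNat m := ofList_single_inj (hini ▸ heq)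
      have := congrArg Char.toNat hcm
      rw [toNat_ofNat_of_lt (by omega)] at this
      omega
  · rw [gbody, hi]
    simp only [gbodyAux]
    apply outer_nomatch
    intro d _ heq
    have := congrArg String.toList heq
    simp [hi] at this

-- ===== VERDICT (by name: the statement is the Claim_ definition above) =====
theorem get_alphabet_set_spec : Claim_equal_get_alphabet_set := by
  unfold Claim_equal_get_alphabet_set
  intro initial final _
  unfold Spec_get_alphabet_set get_alphabet_set
  rw [alt_eq]
  cases hL : pyStrIslower initial.toList
  · have h1 : "ABCDEFGHIJKLMNOPQRSTUVWXYZ".toList = (List.range' ('A'.toNat) 26).map Char.ofNat := by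
      decide
    simp only [if_false, Bool.false_eq_true]
    rw [h1]
    exact A_eq_gbody initial final 'A' 'Z' (by decide) (by decide)
  · have h1 : "abcdefghijklmnopqrstuvwxyz".toList = (List.range' ('a'.toNat) 26).map Char.ofNat := by
      decide
    simp only [if_true]
    rw [h1]
    exact A_eq_gbody initial final 'a' 'z' (by decide) (by decide)
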